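-- pv_equiv track=rewrite | github.com/francistse/ascii-comic-mcp | server.py | _make_outlined
-- ===== SOURCE A (Python) =====
-- def _make_outlined(line: str) -> str:
--     """Convert solid line to outlined version"""
--     result = ''
--     for char in line:
--         if char == ' ':
--             result += ' '
--         else:
--             result += '█'
--     return result
-- ===== SOURCE B (Python) =====
-- def _make_outlined(line: str) -> str:
--     """Convert solid line to outlined version"""
--     return ' '.join('\u2588' * len(tok) for tok in line.split(' '))
-- ===== Notes on version B (the rewrite author's own statement) =====
-- stated objective: simpler
-- what changed: Instead of a char-by-char loop with string concatenation, B splits the line on single spaces, replaces each run of non-space characters by block-char repetition via string multiplication, and rejoins with spaces.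
import Mathlib
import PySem

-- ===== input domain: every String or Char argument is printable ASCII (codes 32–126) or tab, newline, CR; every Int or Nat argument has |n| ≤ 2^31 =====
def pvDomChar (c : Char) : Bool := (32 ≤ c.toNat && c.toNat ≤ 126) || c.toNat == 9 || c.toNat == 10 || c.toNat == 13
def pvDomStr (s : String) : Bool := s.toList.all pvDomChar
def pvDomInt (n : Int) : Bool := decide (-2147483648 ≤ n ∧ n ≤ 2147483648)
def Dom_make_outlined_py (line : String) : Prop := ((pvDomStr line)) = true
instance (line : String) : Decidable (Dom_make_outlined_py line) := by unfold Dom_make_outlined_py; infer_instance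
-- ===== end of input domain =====

-- B replaces the char-by-char loop with split-on-space / block-multiplication / rejoin; objective: simpler.

-- ===== PORT A =====
-- for char in line: result += ' ' if char == ' ' else '█'
def make_outlined_py (line : String) : String :=
  String.ofList
    (line.toList.foldl (fun result c => result ++ [if c == ' ' then ' ' else '█']) [])

-- ===== PORT B =====
-- ' '.join('█' * len(tok) for tok in line.split(' '))
def make_outlined_py_alt (line : String) : String :=
  String.ofList
    (PySem.Chars.join [' ']
      ((PySem.Chars.splitOn line.toList [' ']).map (fun tok => List.replicate tok.length '█')))

-- ===== PRECONDITION & SPEC =====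
def Spec_make_outlined_py (line : String) (out : String) : Prop := out = make_outlined_py_alt line
instance (line : String) (out : String) : Decidable (Spec_make_outlined_py line out) := by unfold Spec_make_outlined_py; infer_instance

-- ===== CLAIM (what is proved, stated in full; the proofs are below) =====
def Claim_equal_make_outlined_py : Prop := ∀ (line : String), Dom_make_outlined_py line → Spec_make_outlined_py line (make_outlined_py line)

-- ===== LEMMAS AND PROOFS =====

-- the per-character replacement both sides compute
def pvOut (c : Char) : Char := if c == ' ' then ' ' else '█'

-- simple structural recursion equal to splitOn's fuelled worker for sep = [' ']
def pvSplit : List Char → List Char → List (List Char)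
  | [], cur => [cur.reverse]
  | c :: rest, cur =>
      if c = ' ' then cur.reverse :: pvSplit rest [] else pvSplit rest (c :: cur)

theorem pvGo_eq (l : List Char) : ∀ fuel cur acc, l.length ≤ fuel →
    PySem.Chars.splitOn.go [' '] fuel l cur acc = acc.reverse ++ pvSplit l cur := by
  induction l with
  | nil =>
      intro fuel cur acc _
      cases fuel <;> simp [PySem.Chars.splitOn.go, pvSplit]
  | cons c rest ih =>
      intro fuel cur acc h
      cases fuel with
      | zero => simp at h
      | succ n =>
          have hn : rest.length ≤ n := by simp [List.length_cons] at h; omega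
          by_cases hc : c = ' '
          · subst hc
            rw [show PySem.Chars.splitOn.go [' '] (n + 1) (' ' :: rest) cur acc
                  = PySem.Chars.splitOn.go [' '] n rest [] (cur.reverse :: acc) from by
                simp [PySem.Chars.splitOn.go, List.isPrefixOf]]
            rw [ih n [] (cur.reverse :: acc) hn]
            simp [pvSplit]
          · rw [show PySem.Chars.splitOn.go [' '] (n + 1) (c :: rest) cur acc
                  = PySem.Chars.splitOn.go [' '] n rest (c :: cur) acc from by
                simp [PySem.Chars.splitOn.go, List.isPrefixOf, Ne.symm hc]]
            rw [ih n (c :: cur) acc hn]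
            simp [pvSplit, hc]

theorem pvSplit_ne_nil (l cur : List Char) : pvSplit l cur ≠ [] := by
  induction l generalizing cur with
  | nil => simp [pvSplit]
  | cons c rest ih =>
      by_cases hc : c = ' ' <;> simp [pvSplit, hc, ih]

theorem pvJoin_split (l : List Char) : ∀ cur,
    PySem.Chars.join [' '] ((pvSplit l cur).map (fun tok => List.replicate tok.length '█'))
      = List.replicate cur.length '█' ++ l.map pvOut := by
  induction l with
  | nil => intro cur; simp [pvSplit, PySem.Chars.join_singleton]
  | cons c rest ih =>
      intro cur
      by_cases hc : c = ' '
      · subst hc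
        obtain ⟨p, t, hpt⟩ := List.exists_cons_of_ne_nil (pvSplit_ne_nil rest [])
        have h0 := ih []
        rw [hpt] at h0
        rw [show pvSplit (' ' :: rest) cur = cur.reverse :: pvSplit rest [] from by
              simp [pvSplit], hpt]
        rw [List.map_cons, List.map_cons, PySem.Chars.join_cons_cons]
        rw [List.map_cons] at h0
        simp [h0, pvOut]
      · rw [show pvSplit (c :: rest) cur = pvSplit rest (c :: cur) from by simp [pvSplit, hc]]
        rw [ih (c :: cur)]
        simp [pvOut, hc, List.replicate_succ']

theorem pvFoldl_eq (l : List Char) : ∀ acc,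
    l.foldl (fun result c => result ++ [if c == ' ' then ' ' else '█']) acc = acc ++ l.map pvOut := by
  induction l with
  | nil => simp
  | cons c rest ih =>
      intro acc
      rw [List.foldl_cons, ih]
      simp [pvOut]

-- ===== VERDICT (by name: the statement is the Claim_ definition above) =====
theorem make_outlined_py_spec : Claim_equal_make_outlined_py := by
  intro line _
  unfold Spec_make_outlined_py make_outlined_py make_outlined_py_alt
  rw [PySem.Chars.splitOn, pvGo_eq _ (line.toList.length + 1) [] [] (by omega),
    pvFoldl_eq]
  simp [pvJoin_split]
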